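-- pv_equiv track=rewrite | github.com/aww/adventofcode | 2023/day13_point_of_incidence.py | find_reflection_failures
-- ===== SOURCE A (Python) =====
-- import itertools
--
-- def find_reflection_failures(b: list[str]) -> list[tuple[int, int]]:
--     """Returns a list of all possible row/col codes and the number of reflection failures."""
--     ncols = len(b[0])
--     nrows = len(b)
--     results = []
--     for n in range(1, ncols):
--         failures = 0
--         ncolscheck = min(n, ncols-n)
--         for dcol, irow in itertools.product(range(ncolscheck), range(nrows)):
--             if b[irow][n-dcol-1] != b[irow][n+dcol]:
--                 failures += 1
--         results.append((n, failures))
--         failures = 0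
--     for n in range(1, nrows):
--         failures = 0
--         nrowscheck = min(n, nrows-n)
--         for drow, icol in itertools.product(range(nrowscheck), range(ncols)):
--             if b[n-drow-1][icol] != b[n+drow][icol]:
--                 failures += 1
--         results.append((n*100, failures))
--         failures = 0
--     return results
-- ===== SOURCE B (Python) =====
-- def find_reflection_failures(b: list[str]) -> list[tuple[int, int]]:
--     """Returns a list of all possible row/col codes and the number of reflection failures."""
--     nrows = len(b)
--     ncols = len(b[0])
--     cols = [tuple(r[i] for r in b) for i in range(ncols)]
--     rows = [r[:ncols] for r in b]
--     # One aggregation pass: every index pair i < j with i + j odd is compared by exactly one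
--     # mirror (the one at n = (i + j + 1) // 2), so accumulate each pair's Hamming distance
--     # (with an equal-line shortcut) into a histogram over anti-diagonals s = i + j.
--     colsum = [0] * (2 * ncols)
--     for j in range(ncols):
--         for i in range((j + 1) % 2, j, 2):
--             colsum[i + j] += 0 if cols[i] == cols[j] else sum(x != y for x, y in zip(cols[i], cols[j]))
--     rowsum = [0] * (2 * nrows)
--     for j in range(nrows):
--         for i in range((j + 1) % 2, j, 2):
--             rowsum[i + j] += 0 if rows[i] == rows[j] else sum(x != y for x, y in zip(rows[i], rows[j]))
--     # each mirror's failure count is one histogram cell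
--     return ([(n, colsum[2 * n - 1]) for n in range(1, ncols)] +
--             [(n * 100, rowsum[2 * n - 1]) for n in range(1, nrows)])
-- ===== Notes on version B (the rewrite author's own statement) =====
-- stated objective: faster
-- what changed: B extracts columns and truncated rows once, then makes a single aggregation pass over the odd-sum index pairs, accumulating each pair's Hamming distance (with an equal-line shortcut and whole-line zip comparisons) into a histogram over anti-diagonals s = i + j, so each mirror's failure count is one histogram cell colsum[2n-1]; A instead re-runs per-mirror itertools.product loops comparing characters by index arithmetic.
import Mathlib
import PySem

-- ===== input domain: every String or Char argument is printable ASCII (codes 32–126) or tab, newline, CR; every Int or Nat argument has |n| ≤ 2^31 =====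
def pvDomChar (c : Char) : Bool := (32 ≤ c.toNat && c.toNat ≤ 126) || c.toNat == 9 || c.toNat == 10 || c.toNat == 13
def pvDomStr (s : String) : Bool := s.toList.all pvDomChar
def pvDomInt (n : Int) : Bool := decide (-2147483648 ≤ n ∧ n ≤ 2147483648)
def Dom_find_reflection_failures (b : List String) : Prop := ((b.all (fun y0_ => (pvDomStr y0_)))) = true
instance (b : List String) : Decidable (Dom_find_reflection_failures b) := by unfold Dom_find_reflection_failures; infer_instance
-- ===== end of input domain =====

-- B makes one aggregation pass accumulating each odd-sum line pair's Hamming distance (with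
-- an equal-line shortcut) into a histogram over anti-diagonals s = i + j, then reads each
-- mirror's failure count as the cell 2n - 1; A re-compares characters per mirror.
-- (objective: faster — same asymptotics, constant-factor win measured)

-- ===== PORT A =====
-- b[irow][idx] (both Python indexings; defaults only reached outside Pre_)
def pvCharAt (b : List String) (irow idx : Int) : Char :=
  (PySem.Str.pyGet? ((PySem.List.pyGet? b irow).getD "") idx).getD ' '

def find_reflection_failures (b : List String) : List (Int × Int) :=
  let ncols : Int := PySem.Str.len ((PySem.List.pyGet? b 0).getD "")
  let nrows : Int := (b.length : Int)
  let results : List (Int × Int) :=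
    (PySem.List.pyRange 1 ncols 1).foldl (fun res n =>
      let ncolscheck := min n (ncols - n)
      let failures : Int :=
        (PySem.List.pyRange 0 ncolscheck 1).foldl (fun f dcol =>
          (PySem.List.pyRange 0 nrows 1).foldl (fun f irow =>
            if pvCharAt b irow (n - dcol - 1) ≠ pvCharAt b irow (n + dcol) then f + 1 else f) f) 0
      res ++ [(n, failures)]) []
  (PySem.List.pyRange 1 nrows 1).foldl (fun res n =>
    let nrowscheck := min n (nrows - n)
    let failures : Int :=
      (PySem.List.pyRange 0 nrowscheck 1).foldl (fun f drow =>
        (PySem.List.pyRange 0 ncols 1).foldl (fun f icol =>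
          if pvCharAt b (n - drow - 1) icol ≠ pvCharAt b (n + drow) icol then f + 1 else f) f) 0
    res ++ [(n * 100, failures)]) results

-- ===== PORT B =====
-- '0 if xs == ys else sum(x != y for x, y in zip(xs, ys))' (a line kept as List Char)
def pvLineDiff (xs ys : List Char) : Int :=
  if xs = ys then 0 else ((xs.zip ys).map (fun p => if p.1 ≠ p.2 then (1 : Int) else 0)).sum

-- a line-pair's contribution: lines[i] / lines[j] are Python list indexings (always in range)
def pvPairDiff (lines : List (List Char)) (i j : Int) : Int :=
  pvLineDiff (PySem.List.pyGetD lines i []) (PySem.List.pyGetD lines j [])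

-- hist = [0]*(2*W); for j in range(W): for i in range((j+1)%2, j, 2): hist[i+j] += <pvPairDiff>
def pvScatter (W : Int) (lines : List (List Char)) : List Int :=
  (PySem.List.pyRange 0 W 1).foldl (fun acc j =>
    (PySem.List.pyRange (PySem.Int.mod (j + 1) 2) j 2).foldl (fun acc i =>
      PySem.List.pySetD acc (i + j)
        (PySem.List.pyGetD acc (i + j) 0 + pvPairDiff lines i j)) acc)
    (List.replicate (2 * W).toNat 0)

def find_reflection_failures_alt (b : List String) : List (Int × Int) :=
  let nrows : Int := (b.length : Int)
  let ncols : Int := PySem.Str.len ((PySem.List.pyGet? b 0).getD "")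
  -- cols = [tuple(r[i] for r in b) for i in range(ncols)]
  let cols : List (List Char) :=
    (PySem.List.pyRange 0 ncols 1).map (fun i => b.map (fun r => (PySem.Str.pyGet? r i).getD ' '))
  -- rows = [r[:ncols] for r in b]
  let rows : List (List Char) :=
    b.map (fun r => PySem.List.slice r.toList none (some ncols))
  let colsum := pvScatter ncols cols
  let rowsum := pvScatter nrows rows
  -- the histogram reads are always in range (1 ≤ n < W gives 1 ≤ 2n-1 < 2W), so .getD 0 is exact
  ((PySem.List.pyRange 1 ncols 1).map (fun n => (n, PySem.List.pyGetD colsum (2*n - 1) 0))) ++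
  ((PySem.List.pyRange 1 nrows 1).map (fun n => (n * 100, PySem.List.pyGetD rowsum (2*n - 1) 0)))

-- ===== PRECONDITION & SPEC =====
-- Pre_ excludes exactly the inputs on which A raises IndexError: the empty list (b[0])
-- and grids where some row is shorter than the first row (b[irow][idx] out of range).
def Pre_find_reflection_failures (b : List String) : Prop :=
  b ≠ [] ∧ ∀ r ∈ b, PySem.Str.len (b.headD "") ≤ PySem.Str.len r
instance (b : List String) : Decidable (Pre_find_reflection_failures b) := by
  unfold Pre_find_reflection_failures; infer_instance

def pvWitness_find_reflection_failures : List String := ["#.##.", "..#..", "#.##."]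

def Spec_find_reflection_failures (b : List String) (out : List (Int × Int)) : Prop := out = find_reflection_failures_alt b
instance (b : List String) (out : List (Int × Int)) : Decidable (Spec_find_reflection_failures b out) := by unfold Spec_find_reflection_failures; infer_instance

-- ===== CLAIM (what is proved, stated in full; the proofs are below) =====
def Claim_equal_find_reflection_failures : Prop := ∀ (b : List String), Dom_find_reflection_failures b → Pre_find_reflection_failures b → Spec_find_reflection_failures b (find_reflection_failures b)

-- ===== LEMMAS AND PROOFS =====

theorem pvIfAdd (P : Prop) [Decidable P] (f : Int) :
    (if P then f + 1 else f) = f + (if P then 1 else 0) := by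
  split <;> omega

-- A's vertical double loop as a canonical double sum
def pvMM (row : String) (i j : Int) : Int :=
  if (PySem.Str.pyGet? row i).getD ' ' ≠ (PySem.Str.pyGet? row j).getD ' ' then 1 else 0

theorem pvAvert (b : List String) (ncols n : Int) :
    (PySem.List.pyRange 0 (min n (ncols - n)) 1).foldl (fun f dcol =>
        (PySem.List.pyRange 0 (b.length : Int) 1).foldl (fun f irow =>
          if pvCharAt b irow (n - dcol - 1) ≠ pvCharAt b irow (n + dcol) then f + 1 else f) f) 0
    = ((PySem.List.pyRange 0 (min n (ncols - n)) 1).map (fun d =>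
        (b.map (fun row => pvMM row (n - d - 1) (n + d))).sum)).sum := by
  have hin : ∀ (dcol f : Int),
      (PySem.List.pyRange 0 (b.length : Int) 1).foldl (fun f irow =>
        if pvCharAt b irow (n - dcol - 1) ≠ pvCharAt b irow (n + dcol) then f + 1 else f) f
      = f + (b.map (fun row => pvMM row (n - dcol - 1) (n + dcol))).sum := by
    intro dcol f
    have h1 : (fun (f irow : Int) =>
        if pvCharAt b irow (n - dcol - 1) ≠ pvCharAt b irow (n + dcol) then f + 1 else f)
        = (fun (f irow : Int) =>
            (fun (acc : Int) (row : String) => acc + pvMM row (n - dcol - 1) (n + dcol))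
              f (PySem.List.pyGetD b irow "")) := by
      funext f irow
      simp only [pvCharAt, pvMM, PySem.List.pyGetD, pvIfAdd]
      rfl
    rw [h1, PySem.List.foldl_pyRange_zero_pyGetD' b ""
      (fun (acc : Int) (row : String) => acc + pvMM row (n - dcol - 1) (n + dcol)) f,
      PySem.List.foldl_add]
  simp only [hin]
  rw [PySem.List.foldl_add]
  simp

-- A's horizontal double loop as a canonical double sum
theorem pvAhoriz (b : List String) (ncols n : Int) :
    (PySem.List.pyRange 0 (min n ((b.length : Int) - n)) 1).foldl (fun f drow =>
        (PySem.List.pyRange 0 ncols 1).foldl (fun f icol =>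
          if pvCharAt b (n - drow - 1) icol ≠ pvCharAt b (n + drow) icol then f + 1 else f) f) 0
    = ((PySem.List.pyRange 0 (min n ((b.length : Int) - n)) 1).map (fun d =>
        ((PySem.List.pyRange 0 ncols 1).map (fun k =>
          if pvCharAt b (n - d - 1) k ≠ pvCharAt b (n + d) k then (1 : Int) else 0)).sum)).sum := by
  have hin : ∀ (d f : Int),
      (PySem.List.pyRange 0 ncols 1).foldl (fun f icol =>
        if pvCharAt b (n - d - 1) icol ≠ pvCharAt b (n + d) icol then f + 1 else f) f
      = f + ((PySem.List.pyRange 0 ncols 1).map (fun k =>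
          if pvCharAt b (n - d - 1) k ≠ pvCharAt b (n + d) k then (1 : Int) else 0)).sum := by
    intro d f
    have h1 : (fun (f icol : Int) =>
        if pvCharAt b (n - d - 1) icol ≠ pvCharAt b (n + d) icol then f + 1 else f)
        = (fun (f icol : Int) =>
            f + (if pvCharAt b (n - d - 1) icol ≠ pvCharAt b (n + d) icol then (1 : Int) else 0)) := by
      funext f icol
      simp only [pvIfAdd]
    rw [h1, PySem.List.foldl_add]
  simp only [hin]
  rw [PySem.List.foldl_add]
  simp

-- list scatter: inserting at keys other than s leaves cell s unchanged; at s it accumulates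
theorem pvInner (lines : List (List Char)) (j s : Int) (hs0 : 0 ≤ s) (l : List Int) :
    ∀ (acc : List Int), s < (acc.length : Int) →
      (∀ i ∈ l, 0 ≤ i + j ∧ i + j < (acc.length : Int)) →
      PySem.List.pyGetD (l.foldl (fun acc i =>
          PySem.List.pySetD acc (i + j)
            (PySem.List.pyGetD acc (i + j) 0 + pvPairDiff lines i j)) acc) s 0
      = PySem.List.pyGetD acc s 0
        + ((l.filter (fun i => decide (i + j = s))).map (fun i => pvPairDiff lines i j)).sum := by
  induction l with
  | nil => intro acc _ _; simp
  | cons a l ih =>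
    intro acc hsl hb
    obtain ⟨ha0, hal⟩ := hb a List.mem_cons_self
    rw [List.foldl_cons]
    have hlen' : (PySem.List.pySetD acc (a + j)
        (PySem.List.pyGetD acc (a + j) 0 + pvPairDiff lines a j)).length = acc.length :=
      PySem.List.length_pySetD _ _ _
    rw [ih _ (by rw [hlen']; exact hsl)
        (fun i hi => by rw [hlen']; exact hb i (List.mem_cons_of_mem a hi))]
    have hget : PySem.List.pyGetD (PySem.List.pySetD acc (a + j)
          (PySem.List.pyGetD acc (a + j) 0 + pvPairDiff lines a j)) s 0
        = if s = a + j then PySem.List.pyGetD acc s 0 + pvPairDiff lines a j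
          else PySem.List.pyGetD acc s 0 := by
      rw [show a + j = (((a + j).toNat : Nat) : Int) from by omega,
        show s = ((s.toNat : Nat) : Int) from by omega,
        PySem.List.pyGetD_pySetD_natCast _ _ _ _ _ (by omega)]
      by_cases hc : s.toNat = (a + j).toNat
      · rw [if_pos hc, if_pos (by omega)]
        rw [show (((a + j).toNat : Nat) : Int) = ((s.toNat : Nat) : Int) from by omega]
      · rw [if_neg hc, if_neg (by omega)]
    rw [hget]
    by_cases hc : a + j = s
    · rw [List.filter_cons_of_pos (by simpa using hc), if_pos hc.symm]
      simp only [List.map_cons, List.sum_cons]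
      ring
    · rw [List.filter_cons_of_neg (by simpa using hc), if_neg (fun h => hc h.symm)]

theorem pvInnerLen (lines : List (List Char)) (j : Int) (l : List Int) :
    ∀ (acc : List Int),
      (l.foldl (fun acc i => PySem.List.pySetD acc (i + j)
        (PySem.List.pyGetD acc (i + j) 0 + pvPairDiff lines i j)) acc).length = acc.length := by
  induction l with
  | nil => intro acc; rfl
  | cons a l ih =>
    intro acc
    rw [List.foldl_cons, ih, PySem.List.length_pySetD]

theorem pvOuter (lines : List (List Char)) (s : Int) (hs0 : 0 ≤ s) (l : List Int) :
    ∀ (acc : List Int), s < (acc.length : Int) →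
      (∀ j ∈ l, ∀ i ∈ PySem.List.pyRange (PySem.Int.mod (j + 1) 2) j 2,
        0 ≤ i + j ∧ i + j < (acc.length : Int)) →
      PySem.List.pyGetD (l.foldl (fun acc j =>
          (PySem.List.pyRange (PySem.Int.mod (j + 1) 2) j 2).foldl (fun acc i =>
            PySem.List.pySetD acc (i + j)
              (PySem.List.pyGetD acc (i + j) 0 + pvPairDiff lines i j)) acc) acc) s 0
      = PySem.List.pyGetD acc s 0
        + (l.map (fun j =>
            (((PySem.List.pyRange (PySem.Int.mod (j + 1) 2) j 2).filter
              (fun i => decide (i + j = s))).map (fun i => pvPairDiff lines i j)).sum)).sum := by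
  induction l with
  | nil => intro acc _ _; simp
  | cons a l ih =>
    intro acc hsl hb
    rw [List.foldl_cons,
      ih _ (by rw [pvInnerLen]; exact hsl)
        (fun j hj i hi => by rw [pvInnerLen]; exact hb j (List.mem_cons_of_mem a hj) i hi),
      pvInner lines a s hs0 _ acc hsl (fun i hi => hb a List.mem_cons_self i hi)]
    simp only [List.map_cons, List.sum_cons]
    ring

theorem pvNodupRange2 (a b : Int) : (PySem.List.pyRange a b 2).Nodup := by
  rw [PySem.List.pyRange_of_pos a b (by norm_num)]
  exact List.Nodup.map (fun x y h => by omega) List.nodup_range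

-- filtering a nodup list by an equality-characterised predicate keeps at most the one element
theorem pvFilterEq (l : List Int) (x : Int) (p : Int → Bool)
    (hp : ∀ y, p y = true ↔ y = x) (hnd : l.Nodup) :
    l.filter p = if x ∈ l then [x] else [] := by
  induction l with
  | nil => simp
  | cons a l ih =>
    obtain ⟨hna, hnd'⟩ := List.nodup_cons.mp hnd
    by_cases hc : a = x
    · subst hc
      rw [List.filter_cons_of_pos ((hp a).mpr rfl), ih hnd', if_neg hna,
        if_pos List.mem_cons_self]
    · rw [List.filter_cons_of_neg (fun h => hc ((hp a).mp h)), ih hnd']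
      by_cases hm : x ∈ l
      · rw [if_pos hm, if_pos (List.mem_cons_of_mem a hm)]
      · rw [if_neg hm, if_neg (fun h => by
          rcases List.mem_cons.mp h with h1 | h1
          exacts [hc h1.symm, hm h1])]

-- index shift for a range sum
theorem pvShift (g : Int → Int) (a b : Int) :
    ((PySem.List.pyRange a b 1).map g).sum
    = ((PySem.List.pyRange 0 (b - a) 1).map (fun d => g (a + d))).sum := by
  rw [PySem.List.pyRange_one a b, PySem.List.pyRange_one 0 (b - a)]
  simp only [List.map_map, sub_zero]
  apply congrArg
  apply List.map_congr_left
  intro k _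
  simp [Function.comp]

-- the histogram cell 2n-1 holds exactly mirror n's pair sum
theorem pvScatterDiag (W : Int) (lines : List (List Char)) (n : Int)
    (hn1 : 1 ≤ n) (hn2 : n < W) :
    PySem.List.pyGetD (pvScatter W lines) (2*n - 1) 0
    = ((PySem.List.pyRange 0 (min n (W - n)) 1).map
        (fun d => pvPairDiff lines (n - d - 1) (n + d))).sum := by
  have hmod : ∀ j : Int, PySem.Int.mod (j + 1) 2 = (j + 1) % 2 :=
    fun j => PySem.Int.mod_eq_emod_of_pos (show (0:Int) < 2 by norm_num)
  have hrep : ((List.replicate (2*W).toNat (0:Int)).length : Int) = 2*W := by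
    simp; omega
  unfold pvScatter
  rw [pvOuter lines (2*n - 1) (by omega) _ _ (by rw [hrep]; omega)
      (fun j hj i hi => by
        rw [PySem.List.mem_pyRange_one] at hj
        rw [PySem.List.mem_pyRange_iff_of_pos (by norm_num), hmod] at hi
        rw [hrep]
        omega)]
  have hrep0 : PySem.List.pyGetD (List.replicate (2*W).toNat (0:Int)) (2*n - 1) 0 = 0 := by
    rw [PySem.List.pyGetD_eq_getElem _ _ (by omega) (by rw [hrep]; omega)]
    simp
  rw [hrep0, zero_add]
  have hper : ∀ j ∈ PySem.List.pyRange 0 W 1,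
      (((PySem.List.pyRange (PySem.Int.mod (j + 1) 2) j 2).filter
        (fun i => decide (i + j = 2*n - 1))).map (fun i => pvPairDiff lines i j)).sum
      = if n ≤ j ∧ j ≤ 2*n - 1 then pvPairDiff lines (2*n - 1 - j) j else 0 := by
    intro j hj
    rw [PySem.List.mem_pyRange_one] at hj
    rw [pvFilterEq _ (2*n - 1 - j) _ (fun y => by simp; omega) (pvNodupRange2 _ _)]
    by_cases hm : (2*n - 1 - j) ∈ PySem.List.pyRange (PySem.Int.mod (j + 1) 2) j 2
    · have hb := (PySem.List.mem_pyRange_iff_of_pos (by norm_num) _).mp hm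
      rw [hmod] at hb
      rw [if_pos hm, if_pos (by omega)]
      simp
    · have hb := hm ∘ (PySem.List.mem_pyRange_iff_of_pos (by norm_num) _).mpr
      rw [hmod] at hb
      rw [if_neg hm, if_neg (fun hcond => hb (by omega))]
      simp
  rw [List.map_congr_left hper,
    PySem.List.pyRange_one_append 0 n W (by omega) (by omega),
    PySem.List.pyRange_one_append n (min W (2*n)) W (by omega) (by omega)]
  simp only [List.map_append, List.sum_append]
  have hz1 : ((PySem.List.pyRange 0 n 1).map (fun j =>
      if n ≤ j ∧ j ≤ 2*n - 1 then pvPairDiff lines (2*n - 1 - j) j else 0)).sum = 0 := by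
    apply List.sum_eq_zero
    intro x hx
    obtain ⟨j, hj, rfl⟩ := List.mem_map.mp hx
    rw [PySem.List.mem_pyRange_one] at hj
    rw [if_neg (by omega)]
  have hz2 : ((PySem.List.pyRange (min W (2*n)) W 1).map (fun j =>
      if n ≤ j ∧ j ≤ 2*n - 1 then pvPairDiff lines (2*n - 1 - j) j else 0)).sum = 0 := by
    apply List.sum_eq_zero
    intro x hx
    obtain ⟨j, hj, rfl⟩ := List.mem_map.mp hx
    rw [PySem.List.mem_pyRange_one] at hj
    rw [if_neg (by omega)]
  have hmid : (PySem.List.pyRange n (min W (2*n)) 1).map (fun j =>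
      if n ≤ j ∧ j ≤ 2*n - 1 then pvPairDiff lines (2*n - 1 - j) j else 0)
      = (PySem.List.pyRange n (min W (2*n)) 1).map (fun j => pvPairDiff lines (2*n - 1 - j) j) := by
    apply List.map_congr_left
    intro j hj
    rw [PySem.List.mem_pyRange_one] at hj
    rw [if_pos (by omega)]
  rw [hz1, hz2, hmid, zero_add, add_zero, pvShift,
    show min W (2*n) - n = min n (W - n) from by omega]
  apply congrArg
  apply List.map_congr_left
  intro d hd
  rw [PySem.List.mem_pyRange_one] at hd
  rw [show 2*n - 1 - (n + d) = n - d - 1 from by ring]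

-- a column-table entry is the per-row mismatch sum
theorem pvColEntry (b : List String) (W i j : Int)
    (hi0 : 0 ≤ i) (hiW : i < W) (hj0 : 0 ≤ j) (hjW : j < W) :
    pvPairDiff ((PySem.List.pyRange 0 W 1).map
        (fun i => b.map (fun r => (PySem.Str.pyGet? r i).getD ' '))) i j
    = (b.map (fun row => pvMM row i j)).sum := by
  unfold pvPairDiff
  rw [PySem.List.pyGetD_map_pyRange_of_nonneg _ _ _ _ hi0 hiW,
    PySem.List.pyGetD_map_pyRange_of_nonneg _ _ _ _ hj0 hjW]
  unfold pvLineDiff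
  split
  · next heq =>
    symm
    apply List.sum_eq_zero
    intro x hx
    obtain ⟨row, hrow, rfl⟩ := List.mem_map.mp hx
    have := List.map_inj_left.mp heq row hrow
    have h2 : (PySem.List.pyGet? row.toList i).getD ' ' = (PySem.List.pyGet? row.toList j).getD ' ' := by
      simpa using this
    simp [pvMM, h2]
  · rw [List.zip_map', List.map_map]
    apply congrArg
    apply List.map_congr_left
    intro row _
    simp [pvMM]

-- zip-mismatch of two truncated lines, as an indexed sum
theorem pvTakeDiff (xs ys : List Char) (N : Nat) (hx : N ≤ xs.length) (hy : N ≤ ys.length) :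
    pvLineDiff (xs.take N) (ys.take N)
    = ((List.range N).map (fun k =>
        if xs[k]?.getD ' ' ≠ ys[k]?.getD ' ' then (1 : Int) else 0)).sum := by
  unfold pvLineDiff
  split
  · next heq =>
    symm
    apply List.sum_eq_zero
    intro x hxm
    obtain ⟨k, hk, rfl⟩ := List.mem_map.mp hxm
    rw [List.mem_range] at hk
    have h1 : (xs.take N)[k]? = (ys.take N)[k]? := by rw [heq]
    rw [List.getElem?_take_of_lt hk, List.getElem?_take_of_lt hk] at h1
    simp [h1]
  · apply congrArg
    apply List.ext_getElem (by simp; omega)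
    intro k h1 h2
    have hk : k < N := by simp at h1; omega
    simp only [List.getElem_map, List.getElem_zip, List.getElem_take, List.getElem_range]
    rw [List.getElem?_eq_getElem (by omega), List.getElem?_eq_getElem (by omega)]
    simp

-- a row-table entry is the per-column mismatch sum (rows at least ncols long)
theorem pvRowEntry (b : List String) (W : Nat) (hlen : ∀ r ∈ b, W ≤ r.toList.length)
    (i j : Int) (hi0 : 0 ≤ i) (hiN : i < (b.length : Int)) (hj0 : 0 ≤ j) (hjN : j < (b.length : Int)) :
    pvPairDiff (b.map (fun r => PySem.List.slice r.toList none (some (W : Int)))) i j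
    = ((PySem.List.pyRange 0 (W : Int) 1).map (fun k =>
        if pvCharAt b i k ≠ pvCharAt b j k then (1 : Int) else 0)).sum := by
  have hmap : ∀ (t : Int),
      PySem.List.pyGetD (b.map (fun r => PySem.List.slice r.toList none (some (W : Int)))) t []
      = PySem.List.slice (PySem.List.pyGetD b t "").toList none (some (W : Int)) := by
    intro t
    have h := PySem.List.pyGetD_map
      (fun r => PySem.List.slice r.toList none (some (W : Int))) b t ""
    have hnil : PySem.List.slice ("" : String).toList none (some (W : Int)) = [] := by
      rw [PySem.List.slice_to _ (by positivity)]
      simp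
    rw [hnil] at h
    exact h
  have hca : ∀ (t : Int) (k : Nat),
      pvCharAt b t (k : Int) = (PySem.List.pyGetD b t "").toList[k]?.getD ' ' := by
    intro t k
    simp only [pvCharAt, PySem.List.pyGetD, PySem.Str.pyGet?_natCast]
  have hmem : ∀ (t : Int), 0 ≤ t → t < (b.length : Int) → PySem.List.pyGetD b t "" ∈ b := by
    intro t h1 h2
    rw [PySem.List.pyGetD_eq_getElem b "" h1 (by simpa using h2)]
    exact List.getElem_mem _
  unfold pvPairDiff
  rw [hmap i, hmap j, PySem.List.slice_to _ (by positivity),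
    PySem.List.slice_to _ (by positivity), Int.toNat_natCast,
    pvTakeDiff _ _ W (hlen _ (hmem i hi0 hiN)) (hlen _ (hmem j hj0 hjN)),
    PySem.List.pyRange_zero_nat, List.map_map]
  apply congrArg
  apply List.map_congr_left
  intro k hk
  simp only [Function.comp]
  rw [hca i k, hca j k]

-- ===== VERDICT (by name: the statement is the Claim_ definition above) =====
theorem find_reflection_failures_spec : Claim_equal_find_reflection_failures := by
  intro b _ hPre
  obtain ⟨hb, hlen⟩ := hPre
  obtain ⟨hd, tl, rfl⟩ : ∃ hd tl, b = hd :: tl := by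
    cases b with
    | nil => exact absurd rfl hb
    | cons hd tl => exact ⟨hd, tl, rfl⟩
  unfold Spec_find_reflection_failures
  simp only [find_reflection_failures, find_reflection_failures_alt]
  have h0 : PySem.List.pyGet? (hd :: tl) (0 : Int) = some hd := by simp
  simp only [h0, Option.getD_some, PySem.Str.len_eq]
  have hlen' : ∀ r ∈ hd :: tl, hd.toList.length ≤ r.toList.length := by
    intro r hr
    have := hlen r hr
    simp only [List.headD_cons, PySem.Str.len_eq] at this
    exact_mod_cast this
  rw [PySem.List.foldl_append_singleton_eq_map, PySem.List.foldl_append_singleton_eq_map,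
    List.nil_append]
  congr 1
  · apply List.map_congr_left
    intro n hn
    rw [PySem.List.mem_pyRange_one] at hn
    refine congrArg (fun v => ((n : Int), v)) ?_
    rw [pvAvert (hd :: tl) (hd.toList.length : Int) n,
      pvScatterDiag (hd.toList.length : Int) _ n hn.1 hn.2]
    apply congrArg
    apply List.map_congr_left
    intro d hdm
    rw [PySem.List.mem_pyRange_one] at hdm
    exact (pvColEntry (hd :: tl) (hd.toList.length : Int) (n - d - 1) (n + d)
      (by omega) (by omega) (by omega) (by omega)).symm
  · apply List.map_congr_left
    intro n hn
    rw [PySem.List.mem_pyRange_one] at hn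
    refine congrArg (fun v => ((n * 100 : Int), v)) ?_
    rw [pvAhoriz (hd :: tl) (hd.toList.length : Int) n,
      pvScatterDiag ((hd :: tl).length : Int) _ n hn.1 hn.2]
    apply congrArg
    apply List.map_congr_left
    intro d hdm
    rw [PySem.List.mem_pyRange_one] at hdm
    exact (pvRowEntry (hd :: tl) hd.toList.length hlen' (n - d - 1) (n + d)
      (by omega) (by omega) (by omega) (by omega)).symm
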